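-- pv_equiv track=rewrite | github.com/nameojamal65-sys/Massa | 33282_tremix_master_backup_20260215_200557.py | allocate_port
-- ===== SOURCE A (Python) =====
-- from typing import Optional, Dict, Any, List, Tuple
--
-- BASE_PORT = 8000
--
-- def allocate_port(reg: Dict[str, Any]) -> int:
--     used=set()
--     for _,info in reg.items():
--         p=info.get("port")
--         if p:
--             try: used.add(int(p))
--             except: pass
--     for port in range(BASE_PORT, BASE_PORT+200):
--         if port not in used: return port
--     raise RuntimeError("No free ports")
-- ===== SOURCE B (Python) =====
-- BASE_PORT = 8000
--
-- def allocate_port(reg):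
--     used = set()
--     for info in reg.values():
--         p = info.get("port")
--         if p:
--             try:
--                 used.add(int(p))
--             except Exception:
--                 pass
--     # gap scan: walk the sorted used ports once, advancing the candidate
--     # past every consecutive taken port starting at BASE_PORT
--     cand = BASE_PORT
--     for p in sorted(used):
--         if p > cand:
--             break
--         if p == cand:
--             cand += 1
--     if cand >= BASE_PORT + 200:
--         raise RuntimeError("No free ports")
--     return cand
-- ===== Notes on version B (the rewrite author's own statement) =====
-- stated objective: alternative
-- what changed: B keeps the used-port collection pass but replaces A's 200-candidate membership scan with a sort-then-gap-scan: it sorts the used ports and walks them once, advancing a candidate counter past each consecutive taken port starting at BASE_PORT, so no membership test over the candidate range is performed.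
import Mathlib
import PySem

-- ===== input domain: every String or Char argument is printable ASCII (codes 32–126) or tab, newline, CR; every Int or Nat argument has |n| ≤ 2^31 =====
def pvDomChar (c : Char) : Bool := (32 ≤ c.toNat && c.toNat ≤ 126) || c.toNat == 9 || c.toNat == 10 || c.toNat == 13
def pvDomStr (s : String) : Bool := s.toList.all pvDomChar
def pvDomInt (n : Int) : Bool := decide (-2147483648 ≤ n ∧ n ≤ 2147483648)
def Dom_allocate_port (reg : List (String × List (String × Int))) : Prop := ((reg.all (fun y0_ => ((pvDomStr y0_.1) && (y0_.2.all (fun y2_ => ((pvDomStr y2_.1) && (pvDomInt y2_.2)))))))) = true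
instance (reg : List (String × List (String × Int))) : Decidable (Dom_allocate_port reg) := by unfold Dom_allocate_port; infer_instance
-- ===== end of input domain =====

-- B keeps A's used-port collection pass but replaces the 200-candidate membership
-- scan by a sort-then-gap-scan over the sorted used ports (objective: alternative).
-- Equivalence is about the RETURN value; neither version mutates its argument.

-- ===== PORT A =====
-- A's used-port accumulation loop: for _, info in reg.items(): p = info.get("port"); if p: used.add(int(p))
def pvUsedA (reg : List (String × List (String × Int))) : PySem.Set Int :=
  (PySem.Dict.ofList reg).items.foldl
    (fun used pr =>
      match (PySem.Dict.ofList pr.2).get? "port" with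
      | some p => if p ≠ 0 then PySem.Set.add used p else used
      | none => used)
    PySem.Set.empty

-- the final `raise RuntimeError("No free ports")` is outside Pre_; the port returns 0 there
def allocate_port (reg : List (String × List (String × Int))) : Int :=
  ((PySem.List.pyRange 8000 8200 1).find?
    (fun port => !(PySem.Set.contains (pvUsedA reg) port))).getD 0

-- ===== PORT B =====
-- B's used-port loop iterates reg.values() instead of reg.items()
def pvUsedB (reg : List (String × List (String × Int))) : PySem.Set Int :=
  (PySem.Dict.ofList reg).values.foldl
    (fun used info =>
      match (PySem.Dict.ofList info).get? "port" with
      | some p => if p ≠ 0 then PySem.Set.add used p else used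
      | none => used)
    PySem.Set.empty

-- B's gap-scan loop: for p in sorted(used): if p > cand: break; if p == cand: cand += 1
def pvGapScan : List Int → Int → Int
  | [], cand => cand
  | p :: rest, cand =>
      if cand < p then cand
      else if p = cand then pvGapScan rest (cand + 1)
      else pvGapScan rest cand

-- `raise RuntimeError("No free ports")` (cand out of range) is outside Pre_; the port returns 0 there
def pvCandB (reg : List (String × List (String × Int))) : Int :=
  pvGapScan (PySem.List.sorted (pvUsedB reg) (fun x => x) false) 8000

def allocate_port_alt (reg : List (String × List (String × Int))) : Int :=
  if 8200 ≤ pvCandB reg then 0 else pvCandB reg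

-- ===== PRECONDITION & SPEC =====
-- Pre_ excludes exactly the registries whose entries occupy all 200 candidate ports,
-- where the Python A raises RuntimeError("No free ports") (and B raises the same).
def Pre_allocate_port (reg : List (String × List (String × Int))) : Prop :=
  ∃ q ∈ List.range 200, ∀ pr ∈ (PySem.Dict.ofList reg).items,
    (PySem.Dict.ofList pr.2).get? "port" ≠ some (8000 + (q : Int))
instance (reg : List (String × List (String × Int))) : Decidable (Pre_allocate_port reg) := by
  unfold Pre_allocate_port; infer_instance

def pvWitness_allocate_port : (List (String × List (String × Int))) :=
  [("svc", [("port", 8005)])]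

def Spec_allocate_port (reg : List (String × List (String × Int))) (out : Int) : Prop := out = allocate_port_alt reg
instance (reg : List (String × List (String × Int))) (out : Int) : Decidable (Spec_allocate_port reg out) := by unfold Spec_allocate_port; infer_instance

-- ===== CLAIM (what is proved, stated in full; the proofs are below) =====
def Claim_equal_allocate_port : Prop := ∀ (reg : List (String × List (String × Int))), Dom_allocate_port reg → Pre_allocate_port reg → Spec_allocate_port reg (allocate_port reg)

-- ===== LEMMAS AND PROOFS =====

-- the two used-port loops compute the same set: B folds over values = items.map (·.2)
lemma pvUsed_eq (reg : List (String × List (String × Int))) : pvUsedB reg = pvUsedA reg := by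
  unfold pvUsedA pvUsedB
  rw [PySem.Dict.values, List.foldl_map]

-- the used-port fold preserves Nodup
lemma nodup_used_fold (l : List (String × List (String × Int))) (init : PySem.Set Int)
    (h : init.Nodup) :
    (l.foldl (fun used pr =>
      match (PySem.Dict.ofList pr.2).get? "port" with
      | some p => if p ≠ 0 then PySem.Set.add used p else used
      | none => used) init).Nodup := by
  induction l generalizing init with
  | nil => exact h
  | cons a t ih =>
      simp only [List.foldl_cons]
      apply ih
      cases hget : (PySem.Dict.ofList a.2).get? "port" with
      | none => simpa using h
      | some p =>
          simp only [hget]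
          split_ifs with hp
          · exact PySem.Set.nodup_add _ _ h
          · exact h

lemma nodup_pvUsedA (reg : List (String × List (String × Int))) : (pvUsedA reg).Nodup :=
  nodup_used_fold _ _ (by simp [PySem.Set.empty])

-- every element of the used set comes from some item's "port" value
lemma mem_used_fold (l : List (String × List (String × Int))) (init : PySem.Set Int)
    (x : Int) (hx : x ∈ l.foldl (fun used pr =>
      match (PySem.Dict.ofList pr.2).get? "port" with
      | some p => if p ≠ 0 then PySem.Set.add used p else used
      | none => used) init) :
    x ∈ init ∨ ∃ pr ∈ l, (PySem.Dict.ofList pr.2).get? "port" = some x := by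
  induction l generalizing init with
  | nil => exact Or.inl hx
  | cons a t ih =>
      simp only [List.foldl_cons] at hx
      rcases ih _ hx with h | ⟨pr, hpr, hget⟩
      · revert h
        cases hget : (PySem.Dict.ofList a.2).get? "port" with
        | none => exact fun h => Or.inl h
        | some p =>
            simp only [hget]
            split_ifs with hp
            · rw [PySem.Set.mem_add]
              rintro (h | rfl)
              · exact Or.inl h
              · exact Or.inr ⟨a, by simp, hget⟩
            · exact fun h => Or.inl h
      · exact Or.inr ⟨pr, by simp [hpr], hget⟩

lemma mem_pvUsedA (reg : List (String × List (String × Int))) (x : Int)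
    (hx : x ∈ pvUsedA reg) :
    ∃ pr ∈ (PySem.Dict.ofList reg).items, (PySem.Dict.ofList pr.2).get? "port" = some x := by
  rcases mem_used_fold _ _ _ hx with h | h
  · simp [PySem.Set.empty] at h
  · exact h

-- the gap scan returns the least value ≥ cand missing from a strictly sorted list
lemma pvGapScan_spec (s : List Int) (c : Int) (hs : s.Pairwise (· < ·)) :
    c ≤ pvGapScan s c ∧ pvGapScan s c ∉ s ∧
      ∀ x, c ≤ x → x < pvGapScan s c → x ∈ s := by
  induction s generalizing c with
  | nil => exact ⟨le_refl c, by simp [pvGapScan], fun x h1 h2 => absurd h2 (by simp [pvGapScan] at h2 ⊢; omega)⟩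
  | cons p t ih =>
      have hpt : ∀ y ∈ t, p < y := (List.pairwise_cons.mp hs).1
      have ht : t.Pairwise (· < ·) := (List.pairwise_cons.mp hs).2
      by_cases h1 : c < p
      · refine ⟨?_, ?_, ?_⟩
        · simp [pvGapScan, h1]
        · simp only [pvGapScan, if_pos h1, List.mem_cons]
          push Not
          exact ⟨by omega, fun hy => by have := hpt c hy; omega⟩
        · intro x hx1 hx2
          simp [pvGapScan, h1] at hx2; omega
      · by_cases h2 : p = c
        · obtain ⟨ih1, ih2, ih3⟩ := ih (c + 1) ht
          simp only [pvGapScan, if_neg h1, if_pos h2]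
          refine ⟨by omega, ?_, ?_⟩
          · simp only [List.mem_cons]
            push Not
            exact ⟨by omega, ih2⟩
          · intro x hx1 hx2
            rcases eq_or_lt_of_le hx1 with rfl | hlt
            · simp [h2]
            · exact List.mem_cons_of_mem _ (ih3 x (by omega) hx2)
        · obtain ⟨ih1, ih2, ih3⟩ := ih c ht
          simp only [pvGapScan, if_neg h1, if_neg h2]
          refine ⟨ih1, ?_, ?_⟩
          · simp only [List.mem_cons]
            push Not
            exact ⟨fun hc => by omega, ih2⟩
          · intro x hx1 hx2
            exact List.mem_cons_of_mem _ (ih3 x hx1 hx2)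

-- find? over a unit-step range returns the first element satisfying the predicate
lemma find?_pyRange_eq_some (p : Int → Bool) (a b m : Int) (h1 : a ≤ m) (h2 : m < b)
    (hbelow : ∀ x, a ≤ x → x < m → p x = false) (hm : p m = true) :
    (PySem.List.pyRange a b 1).find? p = some m := by
  have hab : a < b := by omega
  induction hn : (m - a).toNat generalizing a with
  | zero =>
      have : a = m := by omega
      subst this
      rw [PySem.List.pyRange_one_cons hab, List.find?_cons, hm]
  | succ n ih =>
      have ham : a < m := by omega
      rw [PySem.List.pyRange_one_cons hab, List.find?_cons,
        hbelow a (le_refl a) ham]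
      exact ih (a + 1) (by omega) (fun x hx1 hx2 => hbelow x (by omega) hx2) (by omega) (by omega)

-- ===== VERDICT (by name: the statement is the Claim_ definition above) =====
theorem allocate_port_spec : Claim_equal_allocate_port := by
  intro reg _ hpre
  unfold Spec_allocate_port allocate_port allocate_port_alt
  set u := pvUsedA reg with hu
  set s := PySem.List.sorted u (fun x => x) false with hsdef
  have hnd : u.Nodup := nodup_pvUsedA reg
  have hperm : s.Perm u := PySem.List.sorted_perm u _ _
  have hsnd : s.Nodup := hperm.symm.nodup hnd
  have hsle : s.Pairwise (· ≤ ·) := by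
    simpa using PySem.List.sorted_pairwise u (fun x => x)
  have hslt : s.Pairwise (· < ·) :=
    (hsle.and hsnd).imp (fun h => lt_of_le_of_ne h.1 h.2)
  have hmem : ∀ x : Int, x ∈ s ↔ x ∈ u := fun x => hperm.mem_iff
  obtain ⟨hg1, hg2, hg3⟩ := pvGapScan_spec s 8000 hslt
  set g := pvGapScan s 8000 with hg
  -- Pre_ gives a free port in range, so g < 8200
  obtain ⟨q, hq, hfree⟩ := hpre
  have hqlt : q < 200 := List.mem_range.mp hq
  have hnotu : (8000 + (q : Int)) ∉ u := by
    intro hmemu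
    obtain ⟨pr, hpr, hget⟩ := mem_pvUsedA reg _ hmemu
    exact hfree pr hpr hget
  have hglt : g < 8200 := by
    by_contra hge
    exact hnotu ((hmem _).mp (hg3 (8000 + (q : Int)) (by omega) (by omega)))
  have hfind : (PySem.List.pyRange 8000 8200 1).find?
      (fun port => !(PySem.Set.contains u port)) = some g := by
    apply find?_pyRange_eq_some _ _ _ _ hg1 hglt
    · intro x hx1 hx2
      have hxu : x ∈ u := (hmem x).mp (hg3 x hx1 hx2)
      simpa using hxu
    · have hgu : g ∉ u := fun h => hg2 ((hmem g).mpr h)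
      simp only [Bool.not_eq_eq_eq_not, Bool.not_true]
      rw [Bool.eq_false_iff]
      intro hc
      exact hgu ((PySem.Set.contains_iff u g).mp hc)
  show ((PySem.List.pyRange 8000 8200 1).find?
      (fun port => !(PySem.Set.contains u port))).getD 0 =
    if 8200 ≤ pvCandB reg then 0 else pvCandB reg
  have hcand : pvCandB reg = g := by
    unfold pvCandB
    rw [pvUsed_eq]
  rw [hfind, hcand, if_neg (by omega : ¬ (8200 : Int) ≤ g)]
  rfl
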